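-- pv_equiv track=rewrite | github.com/SS4G/AlgorithmTraining | exercise/leetcode/python_src/Leet697.py | findLeftAndRight
-- ===== SOURCE A (Python) =====
-- def findLeftAndRight(nums, v):
--     leftIdx = 0
--     while nums[leftIdx] != v:
--         leftIdx += 1
--     rightIdx = len(nums) - 1
--     while nums[rightIdx] != v:
--         rightIdx -= 1
--     return rightIdx - leftIdx + 1
-- ===== SOURCE B (Python) =====
-- def findLeftAndRight(nums, v):
--     indices = [i for i, x in enumerate(nums) if x == v]
--     return indices[-1] - indices[0] + 1
-- ===== Notes on version B (the rewrite author's own statement) =====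
-- stated objective: simpler
-- what changed: Replaces A's two directed partial while-scans (one from each end, with manual index bookkeeping) by a single full pass that materialises the list of matching positions, followed by O(1) endpoint arithmetic on that list.
import Mathlib
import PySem

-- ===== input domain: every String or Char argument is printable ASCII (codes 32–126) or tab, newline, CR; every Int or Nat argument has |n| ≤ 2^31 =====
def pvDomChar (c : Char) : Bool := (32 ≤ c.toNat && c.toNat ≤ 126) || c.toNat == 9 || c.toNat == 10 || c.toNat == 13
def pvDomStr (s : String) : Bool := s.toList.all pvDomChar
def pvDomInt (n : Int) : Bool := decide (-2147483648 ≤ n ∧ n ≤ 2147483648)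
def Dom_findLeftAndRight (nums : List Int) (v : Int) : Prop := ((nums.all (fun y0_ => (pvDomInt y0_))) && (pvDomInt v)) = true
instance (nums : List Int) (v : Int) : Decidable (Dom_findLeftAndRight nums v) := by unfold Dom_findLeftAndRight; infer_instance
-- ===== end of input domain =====

-- B replaces A's two directed partial scans (from each end) by one full pass that
-- materialises all matching positions, then endpoint arithmetic: simpler decomposition.


-- ===== PORT A =====
-- left while-scan: compares nums[0], nums[1], … incrementing the index until a hit;
-- transcribed as structural recursion over the list with the index carried along.
-- The [] case is Python's IndexError (off the end); excluded by Pre_.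
def scanLA (v : Int) : List Int → Int → Int
  | [], i => i
  | x :: rest, i => if x ≠ v then scanLA v rest (i + 1) else i

-- right while-scan: compares nums[len-1], nums[len-2], … decrementing the index until a
-- hit; transcribed as structural recursion over the reversed list — the same comparison
-- sequence with the same index values as Python's loop.
def scanRA (v : Int) : List Int → Int → Int
  | [], i => i
  | x :: rest, i => if x ≠ v then scanRA v rest (i - 1) else i

def findLeftAndRight (nums : List Int) (v : Int) : Int :=
  let leftIdx := scanLA v nums 0
  let rightIdx := scanRA v nums.reverse ((nums.length : Int) - 1)
  rightIdx - leftIdx + 1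

-- ===== PORT B =====
-- indices = [i for i, x in enumerate(nums) if x == v]; return indices[-1] - indices[0] + 1
-- (the match's fallback arm is Python's IndexError on an empty indices; excluded by Pre_)
def findLeftAndRight_alt (nums : List Int) (v : Int) : Int :=
  let indices := ((PySem.List.enumerate nums).filter (fun p => p.2 == v)).map (fun p => p.1)
  match PySem.List.pyGet? indices (-1), PySem.List.pyGet? indices 0 with
  | some last, some first => last - first + 1
  | _, _ => 0

-- ===== PRECONDITION & SPEC =====
-- Pre_ excludes exactly the inputs where A raises IndexError (v absent from nums,
-- including the empty list); B raises IndexError there too.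
def Pre_findLeftAndRight (nums : List Int) (v : Int) : Prop := v ∈ nums
instance (nums : List Int) (v : Int) : Decidable (Pre_findLeftAndRight nums v) := by unfold Pre_findLeftAndRight; infer_instance
def pvWitness_findLeftAndRight : List Int × Int := ([1, 2, 1], 1)

def Spec_findLeftAndRight (nums : List Int) (v : Int) (out : Int) : Prop := out = findLeftAndRight_alt nums v
instance (nums : List Int) (v : Int) (out : Int) : Decidable (Spec_findLeftAndRight nums v out) := by unfold Spec_findLeftAndRight; infer_instance

-- ===== CLAIM (what is proved, stated in full; the proofs are below) =====
def Claim_equal_findLeftAndRight : Prop := ∀ (nums : List Int) (v : Int), Dom_findLeftAndRight nums v → Pre_findLeftAndRight nums v → Spec_findLeftAndRight nums v (findLeftAndRight nums v)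

-- ===== LEMMAS AND PROOFS =====

theorem scanLA_eq (v : Int) (l : List Int) (i : Int) (h : v ∈ l) :
    scanLA v l i = i + (l.findIdx (· == v) : Int) := by
  induction l generalizing i with
  | nil => cases h
  | cons x rest ih =>
    by_cases hx : x = v
    · simp [scanLA, hx, List.findIdx_cons]
    · have hb : (x == v) = false := by simpa using hx
      rcases List.mem_cons.mp h with h' | h'
      · exact absurd h'.symm hx
      · simp only [scanLA, if_pos (show x ≠ v from hx)]
        rw [ih (i + 1) h', List.findIdx_cons, hb]
        simp
        ring

theorem scanRA_eq (v : Int) (l : List Int) (i : Int) (h : v ∈ l) :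
    scanRA v l i = i - (l.findIdx (· == v) : Int) := by
  induction l generalizing i with
  | nil => cases h
  | cons x rest ih =>
    by_cases hx : x = v
    · simp [scanRA, hx, List.findIdx_cons]
    · have hb : (x == v) = false := by simpa using hx
      rcases List.mem_cons.mp h with h' | h'
      · exact absurd h'.symm hx
      · simp only [scanRA, if_pos (show x ≠ v from hx)]
        rw [ih (i - 1) h', List.findIdx_cons, hb]
        simp
        ring

-- the index list B builds, generalized over the enumerate start
def idxList (v : Int) (l : List Int) (s : Int) : List Int :=
  ((PySem.List.enumerate l s).filter (fun p => p.2 == v)).map (fun p => p.1)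

theorem idxList_head (v : Int) (l : List Int) (s : Int) (h : v ∈ l) :
    (idxList v l s).head? = some (s + (l.findIdx (· == v) : Int)) := by
  induction l generalizing s with
  | nil => cases h
  | cons x rest ih =>
    by_cases hx : x = v
    · simp [idxList, PySem.List.enumerate_cons, hx, List.findIdx_cons]
    · have hb : (x == v) = false := by simpa using hx
      rcases List.mem_cons.mp h with h' | h'
      · exact absurd h'.symm hx
      · have hih := ih (s + 1) h'
        simp only [idxList] at hih
        simp only [idxList, PySem.List.enumerate_cons, List.filter_cons, hb,
          Bool.false_eq_true, if_false]
        rw [hih, List.findIdx_cons, hb]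
        simp
        ring

theorem idxList_append (v : Int) (l₁ l₂ : List Int) (s : Int) :
    idxList v (l₁ ++ l₂) s = idxList v l₁ s ++ idxList v l₂ (s + l₁.length) := by
  simp [idxList, PySem.List.enumerate_append, List.filter_append]

theorem idxList_last (v : Int) (l : List Int) (s : Int) (h : v ∈ l) :
    (idxList v l s).getLast? =
      some (s + (l.length : Int) - 1 - (l.reverse.findIdx (· == v) : Int)) := by
  induction l using List.reverseRecOn generalizing s with
  | nil => cases h
  | append_singleton l x ih =>
    rw [idxList_append]
    by_cases hx : x = v
    · have hone : idxList v [x] (s + l.length) = [s + (l.length : Int)] := by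
        simp [idxList, PySem.List.enumerate_cons, hx]
      rw [hone]
      simp [List.findIdx_cons, hx]
      push_cast
      ring
    · have hb : (x == v) = false := by simpa using hx
      have hmem : v ∈ l := by
        rcases List.mem_append.mp h with h' | h'
        · exact h'
        · simp at h'; exact absurd h'.symm hx
      have hnil : idxList v [x] (s + l.length) = [] := by
        simp [idxList, PySem.List.enumerate_cons, hb]
      rw [hnil, List.append_nil, ih s hmem]
      rw [List.reverse_append]
      simp only [List.reverse_singleton, List.singleton_append, List.findIdx_cons, hb,
        cond_false]
      simp only [List.length_append, List.length_singleton]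
      push_cast
      ring_nf

theorem findLeftAndRight_eq (nums : List Int) (v : Int) (h : v ∈ nums) :
    findLeftAndRight nums v = findLeftAndRight_alt nums v := by
  have hrev : v ∈ nums.reverse := List.mem_reverse.mpr h
  have hA : findLeftAndRight nums v =
      ((nums.length : Int) - 1 - (nums.reverse.findIdx (· == v) : Int))
        - (0 + (nums.findIdx (· == v) : Int)) + 1 := by
    unfold findLeftAndRight
    rw [scanLA_eq v nums 0 h, scanRA_eq v nums.reverse _ hrev]
  have hhead := idxList_head v nums 0 h
  have hlast := idxList_last v nums 0 h
  unfold findLeftAndRight_alt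
  have hidx : ((PySem.List.enumerate nums).filter (fun p => p.2 == v)).map (fun p => p.1)
      = idxList v nums 0 := rfl
  simp only [hidx]
  rw [PySem.List.pyGet?_neg_one, hlast, PySem.List.pyGet?_zero,
      ← List.head?_eq_getElem?, hhead]
  rw [hA]
  ring

-- ===== VERDICT (by name: the statement is the Claim_ definition above) =====
theorem findLeftAndRight_spec : Claim_equal_findLeftAndRight := by
  intro nums v _ hpre
  exact findLeftAndRight_eq nums v hpre
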